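-- pv_equiv track=rewrite | github.com/MaksimSkavysh/labs | knn/knn.py | get_neighbors_class
-- ===== SOURCE A (Python) =====
-- def get_class_counters(samples):
--     counters = {}
--     for s in samples:
--         if s[-1] in counters:
--             counters[s[-1]] += 1
--         else:
--             counters[s[-1]] = 1
--     return counters
--
-- def get_neighbors_class(neighbors):
--     counters = get_class_counters(neighbors)
--     max_value = 0
--     cur_key = None
--     for key, value in counters.items():
--         if value > max_value:
--             max_value = value
--             cur_key = key
--     return cur_key
-- ===== SOURCE B (Python) =====
-- def get_neighbors_class(neighbors):
--     # Dict-free: scan the label list once, comparing each label's total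
--     # count with the running best; the first position reaching the maximal
--     # count wins, which equals A's insertion-order tie-break.
--     labels = [s[-1] for s in neighbors]
--     best, best_count = None, 0
--     for lab in labels:
--         c = labels.count(lab)
--         if c > best_count:
--             best, best_count = lab, c
--     return best
-- ===== Notes on version B (the rewrite author's own statement) =====
-- stated objective: alternative
-- what changed: Replaces A's counting dict plus separate max-scan over dict items by a dict-free single scan over the label list that compares each label's total count (labels.count) with the running best; the first position attaining the maximal count wins, reproducing A's insertion-order tie-break.
import Mathlib
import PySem

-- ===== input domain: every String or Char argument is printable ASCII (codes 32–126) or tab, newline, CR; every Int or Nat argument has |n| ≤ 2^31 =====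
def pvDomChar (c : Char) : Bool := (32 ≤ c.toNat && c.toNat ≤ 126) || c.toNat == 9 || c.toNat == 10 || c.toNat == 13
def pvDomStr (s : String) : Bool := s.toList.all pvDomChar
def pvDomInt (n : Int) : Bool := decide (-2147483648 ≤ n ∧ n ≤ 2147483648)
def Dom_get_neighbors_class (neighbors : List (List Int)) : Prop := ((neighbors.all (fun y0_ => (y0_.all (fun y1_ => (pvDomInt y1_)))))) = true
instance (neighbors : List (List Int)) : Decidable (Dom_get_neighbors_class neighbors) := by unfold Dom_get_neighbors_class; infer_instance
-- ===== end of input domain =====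

-- B replaces A's counting dict + items max-scan by a dict-free single scan over the
-- label list comparing total counts (alternative structure, not claimed faster).


-- ===== PORT A =====
-- s[-1]: pyGet? with .getD 0; exact under Pre_ (every row nonempty, so pyGet? is some)
def get_class_counters (samples : List (List Int)) : PySem.Dict Int Int :=
  samples.foldl (fun counters s =>
    let k := (PySem.List.pyGet? s (-1)).getD 0
    if counters.contains k then counters.insert k (counters.getD k 0 + 1)
    else counters.insert k 1) PySem.Dict.empty

def get_neighbors_class (neighbors : List (List Int)) : Option Int :=
  let counters := get_class_counters neighbors
  let r := counters.items.foldl (fun (st : Int × Option Int) kv =>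
    if kv.2 > st.1 then (kv.2, some kv.1) else st) (0, none)
  r.2

-- ===== PORT B =====
def get_neighbors_class_alt (neighbors : List (List Int)) : Option Int :=
  let labels := neighbors.map (fun s => (PySem.List.pyGet? s (-1)).getD 0)
  (labels.foldl (fun (st : Option Int × Int) lab =>
    let c := PySem.List.count labels lab
    if c > st.2 then (some lab, c) else st) (none, 0)).1

-- ===== PRECONDITION & SPEC =====
-- Python A raises IndexError on s[-1] for an empty row; Pre_ excludes exactly those inputs.
def Pre_get_neighbors_class (neighbors : List (List Int)) : Prop :=
  ∀ s ∈ neighbors, s ≠ []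
instance (neighbors : List (List Int)) : Decidable (Pre_get_neighbors_class neighbors) := by unfold Pre_get_neighbors_class; infer_instance

def pvWitness_get_neighbors_class : List (List Int) := [[1, 2], [3, 2], [5]]

def Spec_get_neighbors_class (neighbors : List (List Int)) (out : Option Int) : Prop := out = get_neighbors_class_alt neighbors
instance (neighbors : List (List Int)) (out : Option Int) : Decidable (Spec_get_neighbors_class neighbors out) := by unfold Spec_get_neighbors_class; infer_instance

-- ===== CLAIM (what is proved, stated in full; the proofs are below) =====
def Claim_equal_get_neighbors_class : Prop := ∀ (neighbors : List (List Int)), Dom_get_neighbors_class neighbors → Pre_get_neighbors_class neighbors → Spec_get_neighbors_class neighbors (get_neighbors_class neighbors)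

-- ===== LEMMAS AND PROOFS =====

-- the fresh keys that ls adds to `seen`, in first-occurrence order
def pvNewKeys (seen : List Int) : List Int → List Int
  | [] => []
  | x :: ls => if x ∈ seen then pvNewKeys seen ls else x :: pvNewKeys (seen ++ [x]) ls

theorem pvFoldAdd_eq (ls : List Int) : ∀ (seen : List Int),
    ls.foldl PySem.Set.add seen = seen ++ pvNewKeys seen ls := by
  induction ls with
  | nil => intro seen; simp [pvNewKeys]
  | cons x ls ih =>
    intro seen
    by_cases hx : x ∈ seen
    · simp [pvNewKeys, hx, List.foldl_cons, PySem.Set.add, PySem.Set.contains, ih]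
    · simp [pvNewKeys, hx, List.foldl_cons, PySem.Set.add, PySem.Set.contains, ih]

-- main scan lemma
theorem pvScan_eq (cnt : Int → Int) (ls : List Int) : ∀ (seen : List Int) (mv : Int) (ck : Option Int),
    (∀ x ∈ seen, cnt x ≤ mv) →
    ls.foldl (fun (st : Option Int × Int) lab =>
        if cnt lab > st.2 then (some lab, cnt lab) else st) (ck, mv)
    = (let r := ((pvNewKeys seen ls).map (fun k => (k, cnt k))).foldl
          (fun (st : Int × Option Int) kv => if kv.2 > st.1 then (kv.2, some kv.1) else st) (mv, ck)
       (r.2, r.1)) := by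
  induction ls with
  | nil => intro seen mv ck _; simp [pvNewKeys]
  | cons x ls ih =>
    intro seen mv ck hinv
    by_cases hx : x ∈ seen
    · have hle : ¬ (cnt x > mv) := not_lt.mpr (hinv x hx)
      simp only [pvNewKeys, hx, if_true, List.foldl_cons, hle, if_false]
      exact ih seen mv ck hinv
    · simp only [pvNewKeys, hx, if_false, List.map_cons, List.foldl_cons]
      by_cases hgt : cnt x > mv
      · simp only [hgt, if_true]
        exact ih (seen ++ [x]) (cnt x) (some x) (by
          intro y hy
          rcases List.mem_append.mp hy with h | h
          · exact le_of_lt (lt_of_le_of_lt (hinv y h) hgt)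
          · simp at h; subst h; exact le_refl _)
      · simp only [hgt, if_false]
        exact ih (seen ++ [x]) mv ck (by
          intro y hy
          rcases List.mem_append.mp hy with h | h
          · exact hinv y h
          · simp at h; subst h; exact not_lt.mp hgt)

theorem pvStep (d : PySem.Dict Int Int) (k : Int) :
    (if d.contains k then d.insert k (d.getD k 0 + 1) else d.insert k 1)
    = d.insert k (d.getD k 0 + 1) := by
  cases h : d.contains k with
  | true => simp
  | false =>
    have hz : d.getD k 0 = 0 := by
      have hn := PySem.Dict.contains_eq_isSome_get? d k
      rw [h] at hn
      have : d.get? k = none := by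
        cases hg : d.get? k with
        | none => rfl
        | some v => rw [hg] at hn; simp at hn
      simp [PySem.Dict.getD, this]
    simp [hz]

theorem pvCounters (samples : List (List Int)) :
    get_class_counters samples
    = PySem.Dict.counter (samples.map (fun s => (PySem.List.pyGet? s (-1)).getD 0)) := by
  unfold get_class_counters
  rw [← PySem.Dict.foldl_insert_getD_add_one_eq_counter, List.foldl_map]
  have hf : (fun (counters : PySem.Dict Int Int) (s : List Int) =>
      let k := (PySem.List.pyGet? s (-1)).getD 0
      if counters.contains k then counters.insert k (counters.getD k 0 + 1)
      else counters.insert k 1)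
      = (fun (d : PySem.Dict Int Int) (s : List Int) =>
          d.insert ((PySem.List.pyGet? s (-1)).getD 0)
            (d.getD ((PySem.List.pyGet? s (-1)).getD 0) 0 + 1)) := by
    funext d s; exact pvStep d _
  rw [hf]

-- ===== VERDICT (by name: the statement is the Claim_ definition above) =====
theorem get_neighbors_class_spec : Claim_equal_get_neighbors_class := by
  intro neighbors _ _
  unfold Spec_get_neighbors_class get_neighbors_class get_neighbors_class_alt
  simp only [pvCounters, PySem.Dict.items_counter]
  have hset : PySem.Set.ofList (neighbors.map (fun s => (PySem.List.pyGet? s (-1)).getD 0))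
      = pvNewKeys [] (neighbors.map (fun s => (PySem.List.pyGet? s (-1)).getD 0)) := by
    rw [PySem.Set.ofList_eq_foldl]
    simpa using pvFoldAdd_eq _ []
  rw [hset]
  have h := pvScan_eq (fun k => PySem.List.count (neighbors.map (fun s => (PySem.List.pyGet? s (-1)).getD 0)) k)
      (neighbors.map (fun s => (PySem.List.pyGet? s (-1)).getD 0)) [] 0 none (by simp)
  simp only [PySem.List.count_eq] at h ⊢
  rw [h]
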